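-- pv_equiv track=rewrite | github.com/apssouza22/chatflow | server/src/core/agent/chat_response_handler.py | extract_longest_curly_braces_content
-- ===== SOURCE A (Python) =====
-- def extract_longest_curly_braces_content(s):
--     """Extract the longest content between valid curly braces in a string."""
--     stack = []
--     start = -1
--     result = ''
--     longest_len = 0
--     longest_content = ''
--     for i in range(len(s)):
--         if s[i] == '{':
--             stack.append(i)
--         elif s[i] == '}':
--             if len(stack) == 0:
--                 start = i
--             else:
--                 start = stack.pop()
--                 if len(stack) == 0:
--                     content = s[start + 1:i]
--                     content_len = len(content)
--                     if content_len > longest_len: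
--                         longest_len = content_len
--                         longest_content = content
--     return f"{{{longest_content}}}"
-- ===== SOURCE B (Python) =====
-- def extract_longest_curly_braces_content(s):
--     """Segment scan: jump to each next '{' with str.find, match it with a local
--     balance scan, keep the longest matched content (first wins on ties)."""
--     best = ''
--     pos = 0
--     n = len(s)
--     while True:
--         i = s.find('{', pos)
--         if i == -1:
--             break
--         bal = 1
--         j = i + 1
--         while j < n and bal:
--             if s[j] == '{':
--                 bal += 1
--             elif s[j] == '}':
--                 bal -= 1
--             j += 1
--         if bal:
--             break
--         content = s[i + 1:j - 1]
--         if len(content) > len(best):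
--             best = content
--         pos = j
--     return '{' + best + '}'
-- ===== Notes on version B (the rewrite author's own statement) =====
-- stated objective: faster
-- what changed: Replaces A's uniform per-character pass with an index stack and running max by a segment scanner: an outer loop jumps to each next opening brace with str.find, an inner local balance scan finds its matching closing brace (aborting if the string ends unbalanced), and the longest extracted segment is kept.
import Mathlib
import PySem

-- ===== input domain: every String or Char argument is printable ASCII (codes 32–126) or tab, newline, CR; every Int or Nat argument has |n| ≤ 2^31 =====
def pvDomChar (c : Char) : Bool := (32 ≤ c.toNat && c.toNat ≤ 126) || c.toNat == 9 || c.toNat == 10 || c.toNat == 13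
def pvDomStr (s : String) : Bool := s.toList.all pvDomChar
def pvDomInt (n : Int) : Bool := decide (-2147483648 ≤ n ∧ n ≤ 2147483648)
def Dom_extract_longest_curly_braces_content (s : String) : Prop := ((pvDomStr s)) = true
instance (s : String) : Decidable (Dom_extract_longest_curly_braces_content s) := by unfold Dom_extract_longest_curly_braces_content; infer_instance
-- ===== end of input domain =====

-- B replaces A's single uniform pass (index stack + inline running max) by a segment scanner:
-- jump to each next '{' with str.find, match it with a local balance scan, keep the longest
-- segment (same O(n); a timing run measured B faster by a constant factor).

-- ===== PORT A =====
-- one step of A's loop body; state = (stack, start, longest_len, longest_content)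
def pvAStep (cs : List Char) (st : List Int × Int × Nat × List Char) (p : Int × Char) :
    List Int × Int × Nat × List Char :=
  match st, p with
  | (stack, start, llen, lc), (i, c) =>
    if c = '{' then (i :: stack, start, llen, lc)
    else if c = '}' then
      match stack with
      | [] => ([], i, llen, lc)
      | j :: tl =>
        if tl.isEmpty then
          let content := PySem.List.slice cs (some (j + 1)) (some i)
          if content.length > llen then (tl, j, content.length, content)
          else (tl, j, llen, lc)
        else (tl, j, llen, lc)
    else (stack, start, llen, lc)

def extract_longest_curly_braces_content (s : String) : String :=
  let cs := s.toList
  let st := (PySem.List.enumerate cs 0).foldl (pvAStep cs) ([], -1, 0, [])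
  String.ofList ('{' :: st.2.2.2 ++ ['}'])

-- ===== PORT B =====
-- Source B's inner `while j < n and bal:` balance scan after an '{': returns the chars up to the
-- matching '}' (exclusive) and the remainder after it, or none if the string ends unbalanced
def pvScan : List Char → Nat → Option (List Char × List Char)
  | [], _ => none
  | c :: t, bal =>
    let bal' := if c = '{' then bal + 1 else if c = '}' then bal - 1 else bal
    if bal' = 0 then some ([], t)
    else match pvScan t bal' with
      | some (cont, rest) => some (c :: cont, rest)
      | none => none

lemma pvScan_rest_lt : ∀ (u : List Char) (bal : Nat) (cont rest : List Char),
    pvScan u bal = some (cont, rest) → rest.length < u.length := by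
  intro u
  induction u with
  | nil => intro bal cont rest h; simp [pvScan] at h
  | cons c t ih =>
    intro bal cont rest h
    simp only [pvScan] at h
    generalize (if c = '{' then bal + 1 else if c = '}' then bal - 1 else bal) = b' at h
    split at h
    · simp only [Option.some.injEq, Prod.mk.injEq] at h
      obtain ⟨-, rfl⟩ := h
      simp
    · split at h
      · next cont' rest' heq =>
        simp only [Option.some.injEq, Prod.mk.injEq] at h
        obtain ⟨-, rfl⟩ := h
        exact Nat.lt_trans (ih _ _ _ heq) (Nat.lt_succ_self _)
      · simp at h

-- Source B's outer `while True:` loop; `s.find('{', pos)` is transliterated as the non-'{' skipping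
-- recursion; best is the running longest content
def pvB : List Char → List Char → List Char
  | [], best => best
  | c :: t, best =>
    if c = '{' then
      match h : pvScan t 1 with
      | some (cont, rest) => pvB rest (if best.length < cont.length then cont else best)
      | none => best
    else pvB t best
termination_by u _ => u.length
decreasing_by
  · exact Nat.lt_trans (pvScan_rest_lt t 1 cont rest h) (Nat.lt_succ_self _)
  · exact Nat.lt_succ_self _

def extract_longest_curly_braces_content_alt (s : String) : String :=
  String.ofList ('{' :: pvB s.toList [] ++ ['}'])

-- ===== PRECONDITION & SPEC =====
def Spec_extract_longest_curly_braces_content (s : String) (out : String) : Prop := out = extract_longest_curly_braces_content_alt s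
instance (s : String) (out : String) : Decidable (Spec_extract_longest_curly_braces_content s out) := by unfold Spec_extract_longest_curly_braces_content; infer_instance

-- ===== CLAIM =====
def Claim_equal_extract_longest_curly_braces_content : Prop := ∀ (s : String), Dom_extract_longest_curly_braces_content s → Spec_extract_longest_curly_braces_content s (extract_longest_curly_braces_content s)

-- ===== LEMMAS AND PROOFS =====

lemma pvScan_open (t : List Char) (bal : Nat) :
    pvScan ('{' :: t) bal =
      match pvScan t (bal + 1) with
      | some (cont, rest) => some ('{' :: cont, rest)
      | none => none := by
  simp [pvScan]

lemma pvScan_close (t : List Char) (bal : Nat) :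
    pvScan ('}' :: t) bal =
      if bal - 1 = 0 then some ([], t)
      else
        match pvScan t (bal - 1) with
        | some (cont, rest) => some ('}' :: cont, rest)
        | none => none := by
  simp [pvScan]

lemma pvScan_other (c : Char) (t : List Char) (bal : Nat) (h1 : ¬c = '{') (h2 : ¬c = '}')
    (h3 : ¬bal = 0) :
    pvScan (c :: t) bal =
      match pvScan t bal with
      | some (cont, rest) => some (c :: cont, rest)
      | none => none := by
  simp [pvScan, h1, h2, h3]

lemma pvScan_decomp : ∀ (u : List Char) (bal : Nat) (cont rest : List Char),
    1 ≤ bal → pvScan u bal = some (cont, rest) → u = cont ++ '}' :: rest := by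
  intro u
  induction u with
  | nil => intro bal cont rest _ h; simp [pvScan] at h
  | cons c t ih =>
    intro bal cont rest hb h
    by_cases hc : c = '{'
    · subst hc
      rw [pvScan_open] at h
      cases heq : pvScan t (bal + 1) with
      | none => rw [heq] at h; simp at h
      | some p =>
        obtain ⟨cont', rest'⟩ := p
        rw [heq] at h
        simp only [Option.some.injEq, Prod.mk.injEq] at h
        obtain ⟨rfl, rfl⟩ := h
        simpa using ih (bal + 1) cont' rest' (by omega) heq
    · by_cases hd : c = '}'
      · subst hd
        rw [pvScan_close] at h
        split at h
        · simp only [Option.some.injEq, Prod.mk.injEq] at h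
          obtain ⟨rfl, rfl⟩ := h
          simp
        · cases heq : pvScan t (bal - 1) with
          | none => rw [heq] at h; simp at h
          | some p =>
            obtain ⟨cont', rest'⟩ := p
            rw [heq] at h
            simp only [Option.some.injEq, Prod.mk.injEq] at h
            obtain ⟨rfl, rfl⟩ := h
            simpa using ih (bal - 1) cont' rest' (by omega) heq
      · rw [pvScan_other c t bal hc hd (by omega)] at h
        cases heq : pvScan t bal with
        | none => rw [heq] at h; simp at h
        | some p =>
          obtain ⟨cont', rest'⟩ := p
          rw [heq] at h
          simp only [Option.some.injEq, Prod.mk.injEq] at h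
          obtain ⟨rfl, rfl⟩ := h
          have := ih bal cont' rest' hb heq
          simp [this]

lemma pvAStep_open (cs : List Char) (stack : List Int) (start : Int) (llen : Nat)
    (lc : List Char) (i : Int) :
    pvAStep cs (stack, start, llen, lc) (i, '{') = (i :: stack, start, llen, lc) := by
  simp [pvAStep]

lemma pvAStep_close_nil (cs : List Char) (start : Int) (llen : Nat) (lc : List Char) (i : Int) :
    pvAStep cs ([], start, llen, lc) (i, '}') = ([], i, llen, lc) := by
  simp [pvAStep]

lemma pvAStep_close_last (cs : List Char) (j start : Int) (llen : Nat) (lc : List Char)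
    (i : Int) :
    pvAStep cs ([j], start, llen, lc) (i, '}') =
      (if (PySem.List.slice cs (some (j + 1)) (some i)).length > llen
       then ([], j, (PySem.List.slice cs (some (j + 1)) (some i)).length,
             PySem.List.slice cs (some (j + 1)) (some i))
       else ([], j, llen, lc)) := by
  simp [pvAStep]

lemma pvAStep_close_cons (cs : List Char) (j : Int) (tl : List Int) (start : Int)
    (llen : Nat) (lc : List Char) (i : Int) (h : tl.isEmpty = false) :
    pvAStep cs (j :: tl, start, llen, lc) (i, '}') = (tl, j, llen, lc) := by
  simp [pvAStep, h]

lemma pvAStep_other (cs : List Char) (st : List Int × Int × Nat × List Char) (i : Int)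
    (c : Char) (h1 : ¬c = '{') (h2 : ¬c = '}') : pvAStep cs st (i, c) = st := by
  obtain ⟨stack, start, llen, lc⟩ := st
  simp [pvAStep, h1, h2]

lemma pvA_dead (cs : List Char) :
    ∀ (u : List Char) (bal : Nat) (ext : List Int) (iv start : Int) (llen : Nat)
      (lc : List Char) (k : Int),
      pvScan u bal = none → ext.length + 1 = bal →
      (List.foldl (pvAStep cs) (ext ++ [iv], start, llen, lc)
        (PySem.List.enumerate u k)).2.2.2 = lc := by
  intro u
  induction u with
  | nil => intro bal ext iv start llen lc k _ _; simp [PySem.List.enumerate_nil]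
  | cons c t ih =>
    intro bal ext iv start llen lc k h hext
    rw [PySem.List.enumerate_cons, List.foldl_cons]
    by_cases hc : c = '{'
    · subst hc
      rw [pvScan_open] at h
      cases heq : pvScan t (bal + 1) with
      | some p => rw [heq] at h; cases p; simp at h
      | none =>
        rw [pvAStep_open]
        have : (k :: (ext ++ [iv])) = (k :: ext) ++ [iv] := rfl
        rw [this]
        exact ih (bal + 1) (k :: ext) iv start llen lc (k + 1) heq (by simp; omega)
    · by_cases hd : c = '}'
      · subst hd
        rw [pvScan_close] at h
        split at h
        · simp at h
        · cases heq : pvScan t (bal - 1) with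
          | some p => rw [heq] at h; cases p; simp at h
          | none =>
            cases ext with
            | nil => simp at hext; omega
            | cons e ext' =>
              rw [List.cons_append, pvAStep_close_cons cs e (ext' ++ [iv]) start llen lc k (by simp)]
              exact ih (bal - 1) ext' iv e llen lc (k + 1) heq
                (by simp only [List.length_cons] at hext; omega)
      · rw [pvScan_other c t bal hc hd (by omega)] at h
        cases heq : pvScan t bal with
        | some p => rw [heq] at h; cases p; simp at h
        | none =>
          rw [pvAStep_other cs _ k c hc hd]
          exact ih bal ext iv start llen lc (k + 1) heq hext

lemma pvA_inner (cs : List Char) :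
    ∀ (u : List Char) (bal : Nat) (cont rest : List Char) (ext : List Int) (iv start : Int)
      (llen : Nat) (lc : List Char) (k : Int),
      pvScan u bal = some (cont, rest) → ext.length + 1 = bal →
      List.foldl (pvAStep cs) (ext ++ [iv], start, llen, lc) (PySem.List.enumerate u k) =
      List.foldl (pvAStep cs)
        (if (PySem.List.slice cs (some (iv + 1)) (some (k + cont.length))).length > llen
         then ([], iv, (PySem.List.slice cs (some (iv + 1)) (some (k + cont.length))).length,
               PySem.List.slice cs (some (iv + 1)) (some (k + cont.length)))
         else ([], iv, llen, lc))
        (PySem.List.enumerate rest (k + cont.length + 1)) := by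
  intro u
  induction u with
  | nil => intro bal cont rest ext iv start llen lc k h _; simp [pvScan] at h
  | cons c t ih =>
    intro bal cont rest ext iv start llen lc k h hext
    rw [PySem.List.enumerate_cons, List.foldl_cons]
    by_cases hc : c = '{'
    · subst hc
      rw [pvScan_open] at h
      cases heq : pvScan t (bal + 1) with
      | none => rw [heq] at h; simp at h
      | some p =>
        obtain ⟨cont', rest'⟩ := p
        rw [heq] at h
        simp only [Option.some.injEq, Prod.mk.injEq] at h
        obtain ⟨rfl, rfl⟩ := h
        rw [pvAStep_open]
        have hstep : (k :: (ext ++ [iv])) = (k :: ext) ++ [iv] := rfl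
        rw [hstep,
          ih (bal + 1) cont' rest' (k :: ext) iv start llen lc (k + 1) heq
            (by simp only [List.length_cons]; omega)]
        have h1 : k + 1 + (cont'.length : Int) = k + (('{' :: cont').length : Int) := by
          simp only [List.length_cons]; push_cast; ring
        rw [h1]
    · by_cases hd : c = '}'
      · subst hd
        rw [pvScan_close] at h
        split at h
        · simp only [Option.some.injEq, Prod.mk.injEq] at h
          obtain ⟨rfl, rfl⟩ := h
          cases ext with
          | cons e ext' => simp only [List.length_cons] at hext; omega
          | nil =>
            rw [List.nil_append, pvAStep_close_last]
            simp only [List.length_nil, Nat.cast_zero, add_zero]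
        · cases heq : pvScan t (bal - 1) with
          | none => rw [heq] at h; simp at h
          | some p =>
            obtain ⟨cont', rest'⟩ := p
            rw [heq] at h
            simp only [Option.some.injEq, Prod.mk.injEq] at h
            obtain ⟨rfl, rfl⟩ := h
            cases ext with
            | nil => simp at hext; omega
            | cons e ext' =>
              rw [List.cons_append,
                pvAStep_close_cons cs e (ext' ++ [iv]) start llen lc k (by simp),
                ih (bal - 1) cont' rest' ext' iv e llen lc (k + 1) heq
                  (by simp only [List.length_cons] at hext; omega)]
              have h1 : k + 1 + (cont'.length : Int) = k + (('}' :: cont').length : Int) := by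
                simp only [List.length_cons]; push_cast; ring
              rw [h1]
      · rw [pvScan_other c t bal hc hd (by omega)] at h
        cases heq : pvScan t bal with
        | none => rw [heq] at h; simp at h
        | some p =>
          obtain ⟨cont', rest'⟩ := p
          rw [heq] at h
          simp only [Option.some.injEq, Prod.mk.injEq] at h
          obtain ⟨rfl, rfl⟩ := h
          rw [pvAStep_other cs _ k c hc hd,
            ih bal cont' rest' ext iv start llen lc (k + 1) heq hext]
          have h1 : k + 1 + (cont'.length : Int) = k + ((c :: cont').length : Int) := by
            simp only [List.length_cons]; push_cast; ring
          rw [h1]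

lemma pvB_nil (best : List Char) : pvB [] best = best := by simp [pvB]

lemma pvB_open_some (t cont rest best : List Char) (h : pvScan t 1 = some (cont, rest)) :
    pvB ('{' :: t) best = pvB rest (if best.length < cont.length then cont else best) := by
  rw [pvB, if_pos rfl, h]

lemma pvB_open_none (t best : List Char) (h : pvScan t 1 = none) :
    pvB ('{' :: t) best = best := by
  rw [pvB, if_pos rfl, h]

lemma pvB_skip (c : Char) (t best : List Char) (hc : ¬c = '{') :
    pvB (c :: t) best = pvB t best := by
  rw [pvB, if_neg hc]

lemma pvA_outer (cs : List Char) :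
    ∀ (n : Nat) (t : List Char) (k : Nat) (start : Int) (lc : List Char),
      t.length ≤ n → cs.drop k = t →
      (List.foldl (pvAStep cs) ([], start, lc.length, lc)
        (PySem.List.enumerate t (k : Int))).2.2.2 = pvB t lc := by
  intro n
  induction n with
  | zero =>
    intro t k start lc hlen _
    have ht : t = [] := List.eq_nil_of_length_eq_zero (by omega)
    subst ht
    simp [PySem.List.enumerate_nil, pvB_nil]
  | succ n ih =>
    intro t k start lc hlen hdrop
    cases t with
    | nil => simp [PySem.List.enumerate_nil, pvB_nil]
    | cons c t' =>
      have hdrop' : cs.drop (k + 1) = t' := by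
        rw [← List.drop_drop, hdrop, List.drop_one, List.tail_cons]
      have hcast : ((k : Int) + 1) = ((k + 1 : Nat) : Int) := by push_cast; ring
      rw [PySem.List.enumerate_cons, List.foldl_cons]
      by_cases hc : c = '{'
      · subst hc
        rw [pvAStep_open]
        cases hscan : pvScan t' 1 with
        | none =>
          rw [pvB_open_none t' lc hscan]
          have hdead := pvA_dead cs t' 1 [] (k : Int) start lc.length lc ((k : Int) + 1) hscan rfl
          simpa using hdead
        | some p =>
          obtain ⟨cont, rest⟩ := p
          have hdec := pvScan_decomp t' 1 cont rest (le_refl 1) hscan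
          have hinner := pvA_inner cs t' 1 cont rest [] (k : Int) start lc.length lc
            ((k : Int) + 1) hscan rfl
          simp only [List.nil_append] at hinner
          rw [hinner]
          have hslice : PySem.List.slice cs (some ((k : Int) + 1))
              (some ((k : Int) + 1 + (cont.length : Int))) = cont := by
            rw [hcast, PySem.List.slice_natCast_add, hdrop', hdec]
            exact List.take_left
          rw [hslice]
          have hstate :
              (if cont.length > lc.length
               then (([] : List Int), (k : Int), cont.length, cont)
               else (([] : List Int), (k : Int), lc.length, lc)) =
              (([] : List Int), (k : Int),
                (if lc.length < cont.length then cont else lc).length,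
                (if lc.length < cont.length then cont else lc)) := by
            by_cases hlt : lc.length < cont.length
            · simp [hlt, gt_iff_lt]
            · simp [hlt, gt_iff_lt]
          rw [hstate, pvB_open_some t' cont rest lc hscan]
          have hk2 : (k : Int) + 1 + (cont.length : Int) + 1
              = ((k + 1 + cont.length + 1 : Nat) : Int) := by push_cast; ring
          rw [hk2]
          apply ih
          · have h1 : t'.length ≤ n := by simpa using hlen
            have h2 := congrArg List.length hdec
            simp at h2
            omega
          · have hd2 : List.drop (cont.length + 1) (List.drop (k + 1) cs) = rest := by
              rw [hdrop', hdec,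
                show cont ++ '}' :: rest = (cont ++ ['}']) ++ rest by simp,
                show cont.length + 1 = (cont ++ ['}']).length by simp]
              exact List.drop_left
            rw [List.drop_drop] at hd2
            rw [show k + 1 + cont.length + 1 = k + 1 + (cont.length + 1) from by ring]
            exact hd2
      · rw [pvB_skip c t' lc hc]
        by_cases hd : c = '}'
        · subst hd
          rw [pvAStep_close_nil, hcast]
          exact ih t' (k + 1) (k : Int) lc (by simpa using hlen) hdrop'
        · rw [pvAStep_other cs _ (k : Int) c hc hd, hcast]
          exact ih t' (k + 1) start lc (by simpa using hlen) hdrop'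

-- ===== VERDICT =====
theorem extract_longest_curly_braces_content_spec : Claim_equal_extract_longest_curly_braces_content := by
  intro s _
  unfold Spec_extract_longest_curly_braces_content
  unfold extract_longest_curly_braces_content extract_longest_curly_braces_content_alt
  have h := pvA_outer s.toList s.toList.length s.toList 0 (-1) [] (le_refl _) (by simp)
  simp only [Nat.cast_zero, List.length_nil] at h
  simp only []
  rw [h]
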